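-- pv_equiv track=rewrite | github.com/eXascaleInfolab/CORAD | other-compressions/SIRCS-master/SIRCS.py | recover_tree_chain
-- ===== SOURCE A (Python) =====
-- def recover_tree_chain(treeChain):
--     tree = []
--     branch = []
--     for i in range(len(treeChain)):
--         if (treeChain[i] == '!') :
--             tree.append(branch)
--             branch = []
--         elif (i == len(treeChain) - 1):
--             branch.append(treeChain[i])
--             tree.append(branch)
--             branch = []
--         else:
--             branch.append(treeChain[i])
--     return tree
-- ===== SOURCE B (Python) =====
-- def recover_tree_chain(treeChain):
--     if len(treeChain) == 0:
--         return []
--     cuts = [i for i, x in enumerate(treeChain) if x == '!']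
--     tree = []
--     start = 0
--     for c in cuts:
--         tree.append(list(treeChain[start:c]))
--         start = c + 1
--     if treeChain[-1] != '!':
--         tree.append(list(treeChain[start:]))
--     return tree
-- ===== Notes on version B (the rewrite author's own statement) =====
-- stated objective: alternative
-- what changed: B replaces A's single element-by-element loop carrying a growing branch accumulator with two passes: it first collects the positions of '!' delimiters, then emits the segments between consecutive delimiters by slicing, with a final slice appended only when the sequence does not end in '!'.
import Mathlib
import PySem

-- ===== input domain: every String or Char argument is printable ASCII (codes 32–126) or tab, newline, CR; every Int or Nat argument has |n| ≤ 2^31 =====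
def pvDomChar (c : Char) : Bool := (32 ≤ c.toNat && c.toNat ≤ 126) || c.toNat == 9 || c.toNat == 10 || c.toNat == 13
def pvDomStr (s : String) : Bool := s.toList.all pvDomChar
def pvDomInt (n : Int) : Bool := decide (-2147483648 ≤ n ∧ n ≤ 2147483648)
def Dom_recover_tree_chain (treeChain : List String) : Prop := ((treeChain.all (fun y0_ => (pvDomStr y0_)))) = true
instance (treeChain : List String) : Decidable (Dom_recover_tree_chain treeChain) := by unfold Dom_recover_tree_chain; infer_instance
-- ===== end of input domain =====

-- B replaces A's single element-by-element loop (growing branch accumulator) by two passes: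
-- collect the '!' positions, then emit the segments between consecutive delimiters by slicing.


-- ===== PORT A =====
def recover_tree_chain (treeChain : List String) : List (List String) :=
  let st := (PySem.List.pyRange 0 (treeChain.length : Int) 1).foldl
    (fun (st : List (List String) × List String) i =>
      if PySem.List.pyGetD treeChain i "" = "!" then
        (st.1 ++ [st.2], [])
      else if i = (treeChain.length : Int) - 1 then
        (st.1 ++ [st.2 ++ [PySem.List.pyGetD treeChain i ""]], [])
      else
        (st.1, st.2 ++ [PySem.List.pyGetD treeChain i ""]))
    ([], [])
  st.1

-- ===== PORT B =====
def recover_tree_chain_alt (treeChain : List String) : List (List String) :=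
  if treeChain.length = 0 then []
  else
    let cuts : List Int := (PySem.List.enumerate treeChain 0).filterMap
      (fun p => if p.2 = "!" then some p.1 else none)
    let r := cuts.foldl
      (fun (st : List (List String) × Int) c =>
        (st.1 ++ [PySem.List.slice treeChain (some st.2) (some c)], c + 1))
      ([], 0)
    if PySem.List.pyGetD treeChain (-1) "" ≠ "!" then
      r.1 ++ [PySem.List.slice treeChain (some r.2) none]
    else
      r.1

-- ===== PRECONDITION & SPEC =====
def Spec_recover_tree_chain (treeChain : List String) (out : List (List String)) : Prop := out = recover_tree_chain_alt treeChain
instance (treeChain : List String) (out : List (List String)) : Decidable (Spec_recover_tree_chain treeChain out) := by unfold Spec_recover_tree_chain; infer_instance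

-- ===== CLAIM (what is proved, stated in full; the proofs are below) =====
def Claim_equal_recover_tree_chain : Prop := ∀ (treeChain : List String), Dom_recover_tree_chain treeChain → Spec_recover_tree_chain treeChain (recover_tree_chain treeChain)

-- ===== LEMMAS AND PROOFS =====

/-- Reference split: `splitGo branch xs` is what A's loop produces for the remaining
suffix `xs` with pending branch `branch` (the last element is handled specially). -/
def splitGo : List String → List String → List (List String)
  | _, [] => []
  | branch, [x] => if x = "!" then [branch] else [branch ++ [x]]
  | branch, x :: y :: rest =>
      if x = "!" then branch :: splitGo [] (y :: rest) else splitGo (branch ++ [x]) (y :: rest)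

lemma splitGo_bang (branch : List String) (xs : List String) :
    splitGo branch ("!" :: xs) = branch :: splitGo [] xs := by
  cases xs <;> simp [splitGo]

lemma foldA_go (tc : List String) :
    ∀ (xs : List String) (s : Nat) (tree : List (List String)) (branch : List String),
    s + xs.length = tc.length → tc.drop s = xs →
    ((PySem.List.pyRange (s : Int) (tc.length : Int) 1).foldl
      (fun (st : List (List String) × List String) i =>
        if PySem.List.pyGetD tc i "" = "!" then
          (st.1 ++ [st.2], [])
        else if i = (tc.length : Int) - 1 then
          (st.1 ++ [st.2 ++ [PySem.List.pyGetD tc i ""]], [])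
        else
          (st.1, st.2 ++ [PySem.List.pyGetD tc i ""]))
      (tree, branch)).1 = tree ++ splitGo branch xs := by
  intro xs
  induction xs with
  | nil =>
      intro s tree branch hlen hdrop
      simp only [List.length_nil, Nat.add_zero] at hlen
      rw [PySem.List.pyRange_one_eq_nil (by omega)]
      simp [splitGo]
  | cons x xs' ih =>
      intro s tree branch hlen hdrop
      simp only [List.length_cons] at hlen
      have hs : s < tc.length := by omega
      have hx : tc[s] = x := by
        have h0 : (tc.drop s)[0]? = some x := by rw [hdrop]; rfl
        rw [List.getElem?_drop, Nat.add_zero, List.getElem?_eq_getElem hs] at h0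
        exact Option.some.inj h0
      have hdrop' : tc.drop (s + 1) = xs' := by
        have h1 : tc.drop (s + 1) = (tc.drop s).drop 1 := by rw [List.drop_drop]
        rw [h1, hdrop]; rfl
      have hget : PySem.List.pyGetD tc (s : Int) "" = x := by
        rw [PySem.List.pyGetD_ofNat tc s "" hs, hx]
      have hcast : ((s : Int) + 1) = ((s + 1 : Nat) : Int) := by push_cast; ring
      rw [PySem.List.pyRange_one_cons (by exact_mod_cast hs)]
      simp only [List.foldl_cons, hget]
      by_cases hbang : x = "!"
      · rw [if_pos hbang, hcast,
          ih (s + 1) (tree ++ [branch]) [] (by omega) hdrop']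
        rw [hbang, splitGo_bang]
        simp
      · rw [if_neg hbang]
        cases xs' with
        | nil =>
            rw [if_pos (by simp at hlen ⊢; omega), hcast,
              ih (s + 1) (tree ++ [branch ++ [x]]) [] (by simp at hlen ⊢; omega) (by rw [hdrop'])]
            simp [splitGo, hbang]
        | cons y rest =>
            rw [if_neg (by simp at hlen ⊢; omega), hcast,
              ih (s + 1) tree (branch ++ [x]) (by simp at hlen ⊢; omega) hdrop']
            simp [splitGo, hbang]

lemma foldB_go (tc : List String) :
    ∀ (xs : List String) (s t : Nat) (tree : List (List String)),
    t ≤ s → s + xs.length = tc.length → tc.drop s = xs → xs ≠ [] →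
    (if PySem.List.pyGetD tc (-1) "" ≠ "!" then
       (((PySem.List.enumerate xs (s : Int)).filterMap
           (fun p => if p.2 = "!" then some p.1 else none)).foldl
         (fun (st : List (List String) × Int) c =>
           (st.1 ++ [PySem.List.slice tc (some st.2) (some c)], c + 1))
         (tree, (t : Int))).1 ++
       [PySem.List.slice tc
         (some (((PySem.List.enumerate xs (s : Int)).filterMap
             (fun p => if p.2 = "!" then some p.1 else none)).foldl
           (fun (st : List (List String) × Int) c =>
             (st.1 ++ [PySem.List.slice tc (some st.2) (some c)], c + 1))
           (tree, (t : Int))).2) none]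
     else
       (((PySem.List.enumerate xs (s : Int)).filterMap
           (fun p => if p.2 = "!" then some p.1 else none)).foldl
         (fun (st : List (List String) × Int) c =>
           (st.1 ++ [PySem.List.slice tc (some st.2) (some c)], c + 1))
         (tree, (t : Int))).1)
    = tree ++ splitGo ((tc.drop t).take (s - t)) xs := by
  intro xs
  induction xs with
  | nil => intro s t tree _ _ _ h; exact absurd rfl h
  | cons x xs' ih =>
      intro s t tree hts hlen hdrop _
      simp only [List.length_cons] at hlen
      have hs : s < tc.length := by omega
      have hx : tc[s] = x := by
        have h0 : (tc.drop s)[0]? = some x := by rw [hdrop]; rfl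
        rw [List.getElem?_drop, Nat.add_zero, List.getElem?_eq_getElem hs] at h0
        exact Option.some.inj h0
      have hdrop' : tc.drop (s + 1) = xs' := by
        have h1 : tc.drop (s + 1) = (tc.drop s).drop 1 := by rw [List.drop_drop]
        rw [h1, hdrop]; rfl
      have hcast : ((s : Int) + 1) = ((s + 1 : Nat) : Int) := by push_cast; ring
      by_cases hbang : x = "!"
      · have hcuts : ((PySem.List.enumerate (x :: xs') (s : Int)).filterMap
            (fun p => if p.2 = "!" then some p.1 else none))
            = (s : Int) :: ((PySem.List.enumerate xs' ((s : Int) + 1)).filterMap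
              (fun p => if p.2 = "!" then some p.1 else none)) := by
          rw [PySem.List.enumerate_cons]
          simp [hbang]
        rw [hcuts]
        simp only [List.foldl_cons]
        cases xs' with
        | nil =>
            have htc : tc = tc.take s ++ [x] := by
              conv_lhs => rw [← List.take_append_drop s tc]
              rw [hdrop]
            have hlastget : PySem.List.pyGetD tc (-1) "" = x := by
              conv_lhs => rw [htc]
              exact PySem.List.pyGetD_neg_one_append_singleton _ _ _
            rw [hlastget, hbang]
            simp [splitGo, PySem.List.slice_natCast]
        | cons y rest =>
            rw [hcast, ih (s + 1) (s + 1)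
              (tree ++ [PySem.List.slice tc (some (t : Int)) (some (s : Int))])
              (le_refl _) (by simp at hlen ⊢; omega) hdrop' (by simp)]
            rw [hbang, splitGo_bang, PySem.List.slice_natCast]
            simp
      · have hcuts : ((PySem.List.enumerate (x :: xs') (s : Int)).filterMap
            (fun p => if p.2 = "!" then some p.1 else none))
            = (PySem.List.enumerate xs' ((s : Int) + 1)).filterMap
              (fun p => if p.2 = "!" then some p.1 else none) := by
          rw [PySem.List.enumerate_cons]
          simp [hbang]
        rw [hcuts]
        cases xs' with
        | nil =>
            have hslen : s + 1 = tc.length := by simp only [List.length_nil] at hlen; omega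
            have htc : tc = tc.take s ++ [x] := by
              conv_lhs => rw [← List.take_append_drop s tc]
              rw [hdrop]
            have hlastget : PySem.List.pyGetD tc (-1) "" = x := by
              conv_lhs => rw [htc]
              exact PySem.List.pyGetD_neg_one_append_singleton _ _ _
            rw [hlastget]
            simp only [PySem.List.enumerate_nil, List.filterMap_nil, List.foldl_nil,
              ne_eq, hbang, not_false_iff, if_pos]
            rw [PySem.List.slice_from_natCast]
            have hseg : tc.drop t = (tc.drop t).take (s - t) ++ [x] := by
              conv_lhs => rw [htc]
              rw [List.drop_append_of_le_length (by simp only [List.length_take]; omega),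
                List.drop_take]
            conv_lhs => rw [hseg]
            simp [splitGo, hbang]
        | cons y rest =>
            rw [hcast, ih (s + 1) t tree (by omega) (by simp at hlen ⊢; omega) hdrop' (by simp)]
            have hseg : (tc.drop t).take (s + 1 - t) = (tc.drop t).take (s - t) ++ [x] := by
              have hx' : (tc.drop t)[s - t]? = some x := by
                rw [List.getElem?_drop]
                have h2 : t + (s - t) = s := by omega
                rw [h2, List.getElem?_eq_getElem hs, hx]
              rw [show s + 1 - t = (s - t) + 1 by omega, List.take_add_one, hx']
              rfl
            rw [hseg]
            simp [splitGo, hbang]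

-- ===== VERDICT (by name: the statement is the Claim_ definition above) =====
theorem recover_tree_chain_spec : Claim_equal_recover_tree_chain := by
  intro tc _
  unfold Spec_recover_tree_chain
  cases tc with
  | nil => decide
  | cons x xs =>
      simp only [recover_tree_chain, recover_tree_chain_alt]
      rw [if_neg (show ¬(x :: xs).length = 0 by simp)]
      rw [show (0 : Int) = ((0 : Nat) : Int) from by norm_num]
      rw [foldA_go (x :: xs) (x :: xs) 0 [] [] (by simp) rfl]
      rw [foldB_go (x :: xs) (x :: xs) 0 0 [] (le_refl _) (by simp) rfl (by simp)]
      simp
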